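-- pv_equiv track=rewrite | github.com/jasontan656/Otctopus_OS_AgentConsole | Skills/Meta-Runtime-Selfcheck/scripts/runtime_selfcheck_command_governance.py | _replace_repeated_flag_values
-- ===== SOURCE A (Python) =====
-- def _replace_repeated_flag_values(tokens: list[str], flag: str, new_values: list[str]) -> list[str]:
--     result: list[str] = []
--     inserted = False
--     skip_next = False
--     for idx, token in enumerate(tokens):
--         raw = str(token or "")
--         if skip_next:
--             skip_next = False
--             continue
--         if raw == flag:
--             if not inserted:
--                 for value in new_values:
--                     result.extend([flag, value])
--                 inserted = True
--             skip_next = idx + 1 < len(tokens)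
--             continue
--         if raw.startswith(f"{flag}="):
--             if not inserted:
--                 for value in new_values:
--                     result.append(f"{flag}={value}")
--                 inserted = True
--             continue
--         result.append(raw)
--     if not inserted:
--         for value in new_values:
--             result.extend([flag, value])
--     return result
-- ===== SOURCE B (Python) =====
-- def _replace_repeated_flag_values(tokens: list[str], flag: str, new_values: list[str]) -> list[str]:
--     raws = [str(t or "") for t in tokens]
--     # locate pass: first match index and style
--     pos = None
--     bare = True
--     for i, r in enumerate(raws):
--         if r == flag:
--             pos, bare = i, True
--             break
--         if r.startswith(flag + "="):
--             pos, bare = i, False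
--             break
--     # build replacement once
--     if bare:
--         repl = [x for v in new_values for x in (flag, v)]
--     else:
--         repl = [flag + "=" + v for v in new_values]
--     # build pass with index jumps (a bare flag consumes the following token)
--     out = []
--     i = 0
--     n = len(raws)
--     while i < n:
--         r = raws[i]
--         if pos is not None and i == pos:
--             out.extend(repl)
--         if r == flag:
--             i += 2
--         elif r.startswith(flag + "="):
--             i += 1
--         else:
--             out.append(r)
--             i += 1
--     if pos is None:
--         out.extend(repl)
--     return out
-- ===== Notes on version B (the rewrite author's own statement) =====
-- stated objective: alternative
-- what changed: A is a single pass with inserted/skip_next boolean state and inline extends; B first runs a locate pass recording the first match's index and style, builds the replacement list once from that style, then a build pass over indices with explicit jumps (i+=2 after a bare flag) that splices the precomputed replacement at the recorded position or appends it when no match was found.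
import Mathlib
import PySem

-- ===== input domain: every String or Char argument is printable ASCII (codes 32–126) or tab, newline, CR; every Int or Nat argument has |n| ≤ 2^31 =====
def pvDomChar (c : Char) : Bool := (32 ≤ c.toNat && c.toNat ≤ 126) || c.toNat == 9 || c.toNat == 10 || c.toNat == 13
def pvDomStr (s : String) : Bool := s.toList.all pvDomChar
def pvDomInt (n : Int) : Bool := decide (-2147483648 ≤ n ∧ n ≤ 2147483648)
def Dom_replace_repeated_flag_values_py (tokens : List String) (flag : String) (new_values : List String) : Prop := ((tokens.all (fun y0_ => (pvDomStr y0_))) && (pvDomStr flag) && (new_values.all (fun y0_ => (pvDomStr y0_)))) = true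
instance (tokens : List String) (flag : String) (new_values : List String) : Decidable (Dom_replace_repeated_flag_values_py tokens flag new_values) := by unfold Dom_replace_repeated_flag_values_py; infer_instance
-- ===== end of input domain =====

-- B re-implements A as a locate pass + precomputed replacement + index-jump build pass
-- (objective: alternative decomposition, same cost). Return-value equivalence only; neither mutates.

-- ===== PORT A =====
-- the body of A's for-loop; state = (result, inserted, skip_next); n = len(tokens)
def pvStepA (n : Int) (flag : String) (new_values : List String)
    (st : List String × Bool × Bool) (p : Int × String) : List String × Bool × Bool :=
  let result := st.1
  let inserted := st.2.1
  let skip_next := st.2.2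
  let raw := p.2          -- str(token or "") is the identity on strings
  if skip_next then (result, inserted, false)
  else if raw = flag then
    ((if !inserted then new_values.foldl (fun acc v => acc ++ [flag, v]) result else result),
     true, decide (p.1 + 1 < n))
  else if PySem.Str.startswith raw (flag ++ "=") then
    ((if !inserted then new_values.foldl (fun acc v => acc ++ [flag ++ "=" ++ v]) result else result),
     true, skip_next)
  else (result ++ [raw], inserted, skip_next)

def replace_repeated_flag_values_py (tokens : List String) (flag : String) (new_values : List String) : List String :=
  let st := (PySem.List.enumerate tokens 0).foldl (pvStepA (tokens.length : Int) flag new_values) ([], false, false)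
  if !st.2.1 then new_values.foldl (fun acc v => acc ++ [flag, v]) st.1 else st.1

-- ===== PORT B =====
-- locate pass: first index whose raw token matches, with its style (true = bare flag, false = "flag=")
def pvLocate (flag : String) : List String → Int → Option (Int × Bool)
  | [], _ => none
  | r :: rest, i =>
    if r = flag then some (i, true)
    else if PySem.Str.startswith r (flag ++ "=") then some (i, false)
    else pvLocate flag rest (i + 1)

-- build pass: the while-loop with index jumps (i += 2 skips the token after a bare flag)
def pvBuild (flag : String) (repl : List String) (pos : Option Int) : List String → Int → List String
  | [], _ => []
  | r :: rest, i =>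
    let pre := if pos = some i then repl else []
    if r = flag then pre ++ pvBuild flag repl pos (rest.drop 1) (i + 2)
    else if PySem.Str.startswith r (flag ++ "=") then pre ++ pvBuild flag repl pos rest (i + 1)
    else pre ++ r :: pvBuild flag repl pos rest (i + 1)
termination_by l => l.length
decreasing_by all_goals (simp; try omega)

def replace_repeated_flag_values_py_alt (tokens : List String) (flag : String) (new_values : List String) : List String :=
  let raws := tokens.map (fun t => t)   -- str(t or "") is the identity on strings
  let loc := pvLocate flag raws 0
  let bare := match loc with | some (_, b) => b | none => true
  let repl := if bare then new_values.flatMap (fun v => [flag, v])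
              else new_values.map (fun v => flag ++ "=" ++ v)
  let pos := loc.map (·.1)
  let out := pvBuild flag repl pos raws 0
  if pos = none then out ++ repl else out

-- ===== PRECONDITION & SPEC =====
def Spec_replace_repeated_flag_values_py (tokens : List String) (flag : String) (new_values : List String) (out : List String) : Prop := out = replace_repeated_flag_values_py_alt tokens flag new_values
instance (tokens : List String) (flag : String) (new_values : List String) (out : List String) : Decidable (Spec_replace_repeated_flag_values_py tokens flag new_values out) := by unfold Spec_replace_repeated_flag_values_py; infer_instance

-- ===== CLAIM (what is proved, stated in full; the proofs are below) =====
def Claim_equal_replace_repeated_flag_values_py : Prop := ∀ (tokens : List String) (flag : String) (new_values : List String), Dom_replace_repeated_flag_values_py tokens flag new_values → Spec_replace_repeated_flag_values_py tokens flag new_values (replace_repeated_flag_values_py tokens flag new_values)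

-- ===== LEMMAS AND PROOFS =====

-- processing after the first match: drop bare flags and their following token, drop "flag=" tokens
def pvTail (flag : String) : List String → List String
  | [] => []
  | r :: rest =>
    if r = flag then pvTail flag (rest.drop 1)
    else if PySem.Str.startswith r (flag ++ "=") then pvTail flag rest
    else r :: pvTail flag rest
termination_by l => l.length
decreasing_by all_goals (simp; try omega)

-- reference semantics both ports are shown equal to
def pvRef (flag : String) (nv : List String) : List String → List String
  | [] => nv.flatMap (fun v => [flag, v])
  | r :: rest =>
    if r = flag then nv.flatMap (fun v => [flag, v]) ++ pvTail flag (rest.drop 1)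
    else if PySem.Str.startswith r (flag ++ "=") then nv.map (fun v => flag ++ "=" ++ v) ++ pvTail flag rest
    else r :: pvRef flag nv rest
termination_by l => l.length
decreasing_by all_goals (simp; try omega)

theorem pvFlattenFlatMap {α β : Type} (g : α → List β) (nv : List α) :
    (nv.map g).flatten = nv.flatMap g := by
  induction nv with
  | nil => rfl
  | cons a t iht => simp [iht]

theorem pvFlattenSingleton {α β : Type} (g : α → β) (nv : List α) :
    (nv.map (fun v => [g v])).flatten = nv.map g := by
  induction nv with
  | nil => rfl
  | cons a t iht => simp [iht]

theorem pvFoldlBare (flag : String) (nv : List String) (acc : List String) :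
    nv.foldl (fun acc v => acc ++ [flag, v]) acc = acc ++ nv.flatMap (fun v => [flag, v]) :=
  PySem.List.foldl_append_eq_flatMap _ _ _

theorem pvFoldlEq (flag : String) (nv : List String) (acc : List String) :
    nv.foldl (fun acc v => acc ++ [flag ++ "=" ++ v]) acc = acc ++ nv.map (fun v => flag ++ "=" ++ v) := by
  rw [PySem.List.foldl_append_eq_flatMap (fun v => [flag ++ "=" ++ v]) nv acc]
  congr 1
  induction nv with
  | nil => simp
  | cons a t iht => simp only [List.flatMap_cons, List.map_cons] at iht ⊢; rw [iht]; rfl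

theorem pvStepA_skip (n : Int) (flag : String) (nv : List String) (res : List String) (ins : Bool) (p : Int × String) :
    pvStepA n flag nv (res, ins, true) p = (res, ins, false) := by
  simp [pvStepA]

theorem pvStepA_bare (n : Int) (flag : String) (nv : List String) (res : List String) (ins : Bool) (i : Int) :
    pvStepA n flag nv (res, ins, false) (i, flag)
      = ((if !ins then nv.foldl (fun acc v => acc ++ [flag, v]) res else res), true, decide (i + 1 < n)) := by
  simp [pvStepA]

theorem pvStepA_eq (n : Int) (flag : String) (nv : List String) (res : List String) (ins : Bool) (i : Int)
    (r : String) (h1 : ¬ r = flag) (h2 : PySem.Str.startswith r (flag ++ "=") = true) :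
    pvStepA n flag nv (res, ins, false) (i, r)
      = ((if !ins then nv.foldl (fun acc v => acc ++ [flag ++ "=" ++ v]) res else res), true, false) := by
  simp only [pvStepA, Bool.false_eq_true, if_false, if_neg h1, if_pos h2]

theorem pvStepA_other (n : Int) (flag : String) (nv : List String) (res : List String) (ins : Bool) (i : Int)
    (r : String) (h1 : ¬ r = flag) (h2 : ¬ PySem.Str.startswith r (flag ++ "=") = true) :
    pvStepA n flag nv (res, ins, false) (i, r) = (res ++ [r], ins, false) := by
  simp only [pvStepA, Bool.false_eq_true, if_false, if_neg h1, if_neg h2]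

-- A's loop after insertion behaves as pvTail (fuel = length bound)
theorem pvTailA (flag : String) (nv : List String) (n : Int) :
    ∀ (k : Nat) (l : List String), l.length ≤ k → ∀ (i : Int) (res : List String),
      i + (l.length : Int) ≤ n →
      ((PySem.List.enumerate l i).foldl (pvStepA n flag nv) (res, true, false)).1 = res ++ pvTail flag l
      ∧ ((PySem.List.enumerate l i).foldl (pvStepA n flag nv) (res, true, false)).2.1 = true := by
  intro k
  induction k with
  | zero =>
    intro l hl i res _
    have : l = [] := List.length_eq_zero_iff.mp (Nat.le_zero.mp hl)
    subst this
    simp [PySem.List.enumerate, pvTail]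
  | succ k ih =>
    intro l hl i res hn
    match l with
    | [] => simp [PySem.List.enumerate, pvTail]
    | r :: rest =>
      rw [PySem.List.enumerate_cons, List.foldl_cons]
      by_cases hf : r = flag
      · subst hf
        rw [pvStepA_bare]
        simp only [Bool.not_true, Bool.false_eq_true, if_false]
        match rest with
        | [] =>
          simp [PySem.List.enumerate, pvTail]
        | x :: rest' =>
          have hskip : (decide (i + 1 < n)) = true := by
            simp only [List.length_cons] at hn; push_cast at hn; simp; omega
          rw [hskip, PySem.List.enumerate_cons, List.foldl_cons, pvStepA_skip]
          have hrec := ih rest' (by simp at hl ⊢; omega) (i + 1 + 1) res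
            (by simp only [List.length_cons] at hn ⊢; push_cast at hn ⊢; omega)
          rw [hrec.1, hrec.2]
          simp [pvTail]
      · by_cases hs : PySem.Str.startswith r (flag ++ "=") = true
        · rw [pvStepA_eq n flag nv res true i r hf hs]
          simp only [Bool.not_true, Bool.false_eq_true, if_false]
          have hrec := ih rest (by simp at hl ⊢; omega) (i + 1) res
            (by simp only [List.length_cons] at hn ⊢; push_cast at hn ⊢; omega)
          constructor
          · rw [hrec.1]; have hs' := hs; simp at hs'
            simp [pvTail, hf, hs']
          · exact hrec.2
        · rw [pvStepA_other n flag nv res true i r hf hs]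
          have hrec := ih rest (by simp at hl ⊢; omega) (i + 1) (res ++ [r])
            (by simp only [List.length_cons] at hn ⊢; push_cast at hn ⊢; omega)
          constructor
          · rw [hrec.1]; have hs' := hs; simp at hs'
            simp [pvTail, hf, hs']
          · exact hrec.2

-- A's whole loop + trailing append behaves as pvRef
theorem pvMainA (flag : String) (nv : List String) (n : Int) :
    ∀ (l : List String) (i : Int) (res : List String),
      i + (l.length : Int) ≤ n →
      (let st := (PySem.List.enumerate l i).foldl (pvStepA n flag nv) (res, false, false)
       if !st.2.1 then nv.foldl (fun acc v => acc ++ [flag, v]) st.1 else st.1)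
        = res ++ pvRef flag nv l := by
  intro l
  induction l with
  | nil =>
    intro i res _
    simp [PySem.List.enumerate, pvRef, pvFoldlBare, pvFlattenFlatMap]
  | cons r rest ih =>
    intro i res hn
    simp only [PySem.List.enumerate_cons, List.foldl_cons]
    by_cases hf : r = flag
    · rw [hf]
      rw [pvStepA_bare]
      simp only [Bool.not_false, if_true]
      match rest with
      | [] =>
        simp [PySem.List.enumerate, pvRef, pvTail, pvFoldlBare, pvFlattenFlatMap]
      | x :: rest' =>
        have hskip : (decide (i + 1 < n)) = true := by
          simp only [List.length_cons] at hn; push_cast at hn; simp; omega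
        rw [hskip, PySem.List.enumerate_cons, List.foldl_cons, pvStepA_skip]
        have hrec := pvTailA flag nv n rest'.length rest' le_rfl (i + 1 + 1)
          (nv.foldl (fun acc v => acc ++ [flag, v]) res)
          (by simp only [List.length_cons] at hn ⊢; push_cast at hn ⊢; omega)
        simp only [hrec.1, hrec.2, Bool.not_true, Bool.false_eq_true, if_false]
        simp [pvRef, pvFoldlBare, pvTail, pvFlattenFlatMap]
    · by_cases hs : PySem.Str.startswith r (flag ++ "=") = true
      · rw [pvStepA_eq n flag nv res false i r hf hs]
        simp only [Bool.not_false, if_true]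
        have hrec := pvTailA flag nv n rest.length rest le_rfl (i + 1)
          (nv.foldl (fun acc v => acc ++ [flag ++ "=" ++ v]) res)
          (by simp only [List.length_cons] at hn ⊢; push_cast at hn ⊢; omega)
        simp only [hrec.1, hrec.2, Bool.not_true, Bool.false_eq_true, if_false]
        have hs' := hs; simp at hs'
        simp [pvRef, hf, hs', pvFoldlEq, pvFlattenSingleton]
      · rw [pvStepA_other n flag nv res false i r hf hs]
        have hrec := ih (i + 1) (res ++ [r])
          (by simp only [List.length_cons] at hn ⊢; push_cast at hn ⊢; omega)
        simp only at hrec ⊢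
        rw [hrec]
        have hs' := hs; simp at hs'
        simp [pvRef, hf, hs']

theorem pvA_eq_ref (tokens : List String) (flag : String) (nv : List String) :
    replace_repeated_flag_values_py tokens flag nv = pvRef flag nv tokens := by
  have h := pvMainA flag nv (tokens.length : Int) tokens 0 [] (by simp)
  simpa [replace_repeated_flag_values_py] using h

-- locate returns an index ≥ the start
theorem pvLocate_ge (flag : String) :
    ∀ (l : List String) (i p : Int) (b : Bool), pvLocate flag l i = some (p, b) → i ≤ p := by
  intro l
  induction l with
  | nil => intro i p b h; simp [pvLocate] at h
  | cons r rest ih =>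
    intro i p b h
    simp only [pvLocate] at h
    split_ifs at h with h1 h2
    · simp at h; omega
    · simp at h; omega
    · have := ih (i + 1) p b h; omega

-- if nothing matches, the build pass copies the list
theorem pvBuild_none (flag : String) (repl : List String) :
    ∀ (l : List String) (i : Int), pvLocate flag l i = none → pvBuild flag repl none l i = l := by
  intro l
  induction l with
  | nil => intro i _; simp [pvBuild]
  | cons r rest ih =>
    intro i h
    simp only [pvLocate] at h
    split_ifs at h with h1 h2
    · have h2' := h2; simp at h2'
      simp [pvBuild, h1, h2', ih (i + 1) h]

-- if nothing matches, pvRef appends the bare replacement at the end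
theorem pvRef_none (flag : String) (nv : List String) :
    ∀ (l : List String) (i : Int), pvLocate flag l i = none →
      pvRef flag nv l = l ++ nv.flatMap (fun v => [flag, v]) := by
  intro l
  induction l with
  | nil => intro i _; simp [pvRef]
  | cons r rest ih =>
    intro i h
    simp only [pvLocate] at h
    split_ifs at h with h1 h2
    · have h2' := h2; simp at h2'
      simp [pvRef, h1, h2', ih (i + 1) h]

-- after the match position the build pass behaves as pvTail
theorem pvBuild_post (flag : String) (repl : List String) :
    ∀ (k : Nat) (l : List String), l.length ≤ k → ∀ (i p : Int), p < i →
      pvBuild flag repl (some p) l i = pvTail flag l := by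
  intro k
  induction k with
  | zero =>
    intro l hl i p _
    have : l = [] := List.length_eq_zero_iff.mp (Nat.le_zero.mp hl)
    subst this; simp [pvBuild, pvTail]
  | succ k ih =>
    intro l hl i p hp
    match l with
    | [] => simp [pvBuild, pvTail]
    | r :: rest =>
      have hne : ¬ (some p = some i) := by simp; omega
      by_cases hf : r = flag
      · simp only [pvBuild, pvTail, if_neg hne, if_pos hf, List.nil_append]
        exact ih (rest.drop 1) (by simp at hl ⊢; omega) (i + 2) p (by omega)
      · by_cases hs : PySem.Str.startswith r (flag ++ "=") = true
        · simp only [pvBuild, pvTail, if_neg hne, if_neg hf, if_pos hs, List.nil_append]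
          exact ih rest (by simp at hl ⊢; omega) (i + 1) p (by omega)
        · simp only [pvBuild, pvTail, if_neg hne, if_neg hf, if_neg hs, List.nil_append]
          rw [ih rest (by simp at hl ⊢; omega) (i + 1) p (by omega)]

-- if something matches, the build pass with the right replacement equals pvRef
theorem pvBuild_some (flag : String) (nv : List String) :
    ∀ (l : List String) (i p : Int) (b : Bool), pvLocate flag l i = some (p, b) →
      pvBuild flag (if b then nv.flatMap (fun v => [flag, v]) else nv.map (fun v => flag ++ "=" ++ v))
        (some p) l i = pvRef flag nv l := by
  intro l
  induction l with
  | nil => intro i p b h; simp [pvLocate] at h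
  | cons r rest ih =>
    intro i p b h
    simp only [pvLocate] at h
    split_ifs at h with h1 h2
    · simp only [Option.some_inj, Prod.mk.injEq] at h
      obtain ⟨hp, hb⟩ := h
      subst hp; subst hb
      simp only [pvBuild, pvRef, if_pos rfl, if_pos h1, List.nil_append, if_true]
      rw [pvBuild_post flag _ (rest.drop 1).length (rest.drop 1) le_rfl (i + 2) i (by omega)]
    · simp only [Option.some_inj, Prod.mk.injEq] at h
      obtain ⟨hp, hb⟩ := h
      subst hp; subst hb
      simp only [pvBuild, pvRef, if_pos rfl, if_neg h1, if_pos h2, List.nil_append,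
        Bool.false_eq_true, if_false]
      rw [pvBuild_post flag _ rest.length rest le_rfl (i + 1) i (by omega)]
      simp
    · have hge := pvLocate_ge flag rest (i + 1) p b h
      have hne : ¬ (some p = some i) := by simp; omega
      simp only [pvBuild, pvRef, if_neg hne, if_neg h1, if_neg h2, List.nil_append]
      rw [ih (i + 1) p b h]

theorem pvB_eq_ref (tokens : List String) (flag : String) (nv : List String) :
    replace_repeated_flag_values_py_alt tokens flag nv = pvRef flag nv tokens := by
  unfold replace_repeated_flag_values_py_alt
  simp only [List.map_id']
  cases h : pvLocate flag tokens 0 with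
  | none =>
    simp only [h]
    simp [pvBuild_none flag _ tokens 0 h, pvRef_none flag nv tokens 0 h]
  | some pb =>
    obtain ⟨p, b⟩ := pb
    simp only [h]
    simp [pvBuild_some flag nv tokens 0 p b h]

-- ===== VERDICT (by name: the statement is the Claim_ definition above) =====
theorem replace_repeated_flag_values_py_spec : Claim_equal_replace_repeated_flag_values_py := by
  intro tokens flag nv _
  unfold Spec_replace_repeated_flag_values_py
  rw [pvA_eq_ref, pvB_eq_ref]
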